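-- pv_equiv track=rewrite | github.com/TesterSim2/FocusApplaction | core/tool_manager.py | suggest_tools
-- ===== SOURCE A (Python) =====
-- from typing import Dict, List, Any, Optional
--
-- def suggest_tools(query: str) -> List[str]:
--     """Suggest tools based on the query"""
--     suggestions = []
--
--     # Simple keyword-based suggestions
--     if any(word in query.lower() for word in ['search', 'find', 'look up']):
--         suggestions.append('search')
--
--     if any(word in query.lower() for word in ['calculate', 'compute', 'math']):
--         suggestions.append('calculator')
--
--     if any(word in query.lower() for word in ['chart', 'graph', 'plot', 'visualize']):
--         suggestions.append('chart')
--
--     return suggestions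
-- ===== SOURCE B (Python) =====
-- # Single left-to-right scan of the lowered query: at each position try every
-- # keyword by prefix match, recording the owning tool in a set; finally emit
-- # matched tools in the fixed canonical order.
-- KEYWORD_TOOL = [
--     ('search', 'search'), ('find', 'search'), ('look up', 'search'),
--     ('calculate', 'calculator'), ('compute', 'calculator'), ('math', 'calculator'),
--     ('chart', 'chart'), ('graph', 'chart'), ('plot', 'chart'), ('visualize', 'chart'),
-- ]
-- TOOL_ORDER = ['search', 'calculator', 'chart']
--
-- def suggest_tools(query):
--     q = query.lower()
--     matched = set()
--     for i in range(len(q)):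
--         for kw, tool in KEYWORD_TOOL:
--             if tool not in matched and q.startswith(kw, i):
--                 matched.add(tool)
--     return [t for t in TOOL_ORDER if t in matched]
-- ===== Notes on version B (the rewrite author's own statement) =====
-- stated objective: alternative
-- what changed: Instead of running a substring search per keyword per branch, B makes a single left-to-right scan of the lowered query, attempting a prefix match of every keyword at each position and accumulating the owning tools in a set, then emits matched tools in the fixed canonical order.
import Mathlib
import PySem

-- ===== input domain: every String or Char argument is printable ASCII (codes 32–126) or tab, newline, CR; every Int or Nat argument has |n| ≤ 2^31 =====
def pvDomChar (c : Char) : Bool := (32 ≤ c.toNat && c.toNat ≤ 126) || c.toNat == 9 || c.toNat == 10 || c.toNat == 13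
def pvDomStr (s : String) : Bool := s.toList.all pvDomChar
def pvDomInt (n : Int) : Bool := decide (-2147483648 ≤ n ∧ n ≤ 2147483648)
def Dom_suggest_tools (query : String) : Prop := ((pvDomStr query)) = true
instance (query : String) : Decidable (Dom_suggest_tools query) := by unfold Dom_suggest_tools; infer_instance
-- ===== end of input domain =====

-- B replaces A's per-keyword substring searches by one left-to-right scan of the lowered query,
-- prefix-matching every keyword at each position into a set of tools, emitted in canonical order
-- (alternative algorithm, same cost class).


-- ===== PORT A =====
def suggest_tools (query : String) : List String :=
  let suggestions : List String := []
  let suggestions := if (["search", "find", "look up"].any (fun w => PySem.Str.isIn w (PySem.Str.lower query))) then suggestions ++ ["search"] else suggestions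
  let suggestions := if (["calculate", "compute", "math"].any (fun w => PySem.Str.isIn w (PySem.Str.lower query))) then suggestions ++ ["calculator"] else suggestions
  let suggestions := if (["chart", "graph", "plot", "visualize"].any (fun w => PySem.Str.isIn w (PySem.Str.lower query))) then suggestions ++ ["chart"] else suggestions
  suggestions

-- ===== PORT B =====
def pvKwTool : List (String × String) :=
  [("search", "search"), ("find", "search"), ("look up", "search"),
   ("calculate", "calculator"), ("compute", "calculator"), ("math", "calculator"),
   ("chart", "chart"), ("graph", "chart"), ("plot", "chart"), ("visualize", "chart")]

def pvToolOrder : List String := ["search", "calculator", "chart"]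

-- inner 'for kw, tool in KEYWORD_TOOL' loop at one position (suf = q[i:]; q.startswith(kw, i) = kw.toList.isPrefixOf suf — exact for 0 ≤ i < len(q))
def pvStep (suf : List Char) (m : PySem.Set String) : PySem.Set String :=
  pvKwTool.foldl (fun m p => if !(PySem.Set.contains m p.2) && p.1.toList.isPrefixOf suf then PySem.Set.add m p.2 else m) m

-- outer 'for i in range(len(q))' loop, as recursion over the successive suffixes of q
def pvScan : List Char → PySem.Set String → PySem.Set String
  | [], m => m
  | c :: rest, m => pvScan rest (pvStep (c :: rest) m)

def suggest_tools_alt (query : String) : List String :=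
  let q := PySem.Str.lower query
  let matched := pvScan q.toList PySem.Set.empty
  pvToolOrder.filter (fun t => PySem.Set.contains matched t)

-- ===== PRECONDITION & SPEC =====
def Spec_suggest_tools (query : String) (out : List String) : Prop := out = suggest_tools_alt query
instance (query : String) (out : List String) : Decidable (Spec_suggest_tools query out) := by unfold Spec_suggest_tools; infer_instance

-- ===== CLAIM (what is proved, stated in full; the proofs are below) =====
def Claim_equal_suggest_tools : Prop := ∀ (query : String), Dom_suggest_tools query → Spec_suggest_tools query (suggest_tools query)

-- ===== LEMMAS AND PROOFS =====

-- 'some keyword kw is a prefix of some suffix visited by the scan'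
def pvKwHit (kw : List Char) : List Char → Bool
  | [] => false
  | c :: rest => kw.isPrefixOf (c :: rest) || pvKwHit kw rest

theorem pvKwHit_eq_isIn (kw : List Char) (hk : kw ≠ []) (s : List Char) :
    pvKwHit kw s = PySem.Chars.isIn kw s := by
  induction s with
  | nil =>
    rcases h : PySem.Chars.isIn kw [] with _ | _
    · rfl
    · exact absurd (List.eq_nil_of_infix_nil ((PySem.Chars.isIn_iff_infix kw []).mp h)) hk
  | cons c rest ih =>
    show (kw.isPrefixOf (c :: rest) || pvKwHit kw rest) = _
    rw [ih]
    rcases h : PySem.Chars.isIn kw (c :: rest) with _ | _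
    · have hni := (PySem.Chars.isIn_eq_false_iff kw (c :: rest)).mp h
      rw [List.infix_cons_iff] at hni
      push_neg at hni
      simp only [Bool.or_eq_false_iff]
      constructor
      · rw [Bool.eq_false_iff]; intro hp
        exact hni.1 (List.isPrefixOf_iff_prefix.mp hp)
      · exact (PySem.Chars.isIn_eq_false_iff kw rest).mpr hni.2
    · have hin := (PySem.Chars.isIn_iff_infix kw (c :: rest)).mp h
      rw [List.infix_cons_iff] at hin
      rcases hin with hp | hs
      · simp [List.isPrefixOf_iff_prefix.mpr hp]
      · simp [(PySem.Chars.isIn_iff_infix kw rest).mpr hs]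

-- one pass of the inner loop, characterised per tool
theorem pvStep_contains (suf : List Char) (m : PySem.Set String) (t : String) :
    PySem.Set.contains (pvStep suf m) t
      = (PySem.Set.contains m t || pvKwTool.any (fun p => p.2 == t && p.1.toList.isPrefixOf suf)) := by
  have key : ∀ (l : List (String × String)) (m : PySem.Set String),
      PySem.Set.contains (l.foldl (fun m p => if !(PySem.Set.contains m p.2) && p.1.toList.isPrefixOf suf then PySem.Set.add m p.2 else m) m) t
        = (PySem.Set.contains m t || l.any (fun p => p.2 == t && p.1.toList.isPrefixOf suf)) := by
    intro l
    induction l with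
    | nil => intro m; simp
    | cons p l ih =>
      intro m
      rw [List.foldl_cons, ih, List.any_cons]
      have hstep : PySem.Set.contains
          (if !(PySem.Set.contains m p.2) && p.1.toList.isPrefixOf suf then PySem.Set.add m p.2 else m) t
          = (PySem.Set.contains m t || (p.2 == t && p.1.toList.isPrefixOf suf)) := by
        by_cases hpre : p.1.toList.isPrefixOf suf
        · by_cases hc : p.2 ∈ m
          · rw [if_neg (by simp [hc])]
            by_cases ht : p.2 = t
            · subst ht; simp [hc, hpre]
            · simp [show (p.2 == t) = false from beq_eq_false_iff_ne.mpr ht]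
          · rw [if_pos (by simp [hc, hpre]), PySem.Set.add, if_neg (by simp [hc])]
            by_cases ht : p.2 = t
            · subst ht; simp [hpre, PySem.Set.contains]
            · simp [hpre, PySem.Set.contains, show ¬ t = p.2 from fun h => ht h.symm,
                    show (p.2 == t) = false from beq_eq_false_iff_ne.mpr ht]
        · simp [hpre]
      rw [hstep, Bool.or_assoc]
  exact key pvKwTool m

theorem pvAnyOr {α : Type} (l : List α) (f g : α → Bool) :
    l.any (fun x => f x || g x) = (l.any f || l.any g) := by
  induction l with
  | nil => rfl
  | cons x l ih =>
    rw [List.any_cons, List.any_cons, List.any_cons, ih]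
    cases f x <;> cases g x <;> simp

theorem pvScan_contains (s : List Char) (m : PySem.Set String) (t : String) :
    PySem.Set.contains (pvScan s m) t
      = (PySem.Set.contains m t || pvKwTool.any (fun p => p.2 == t && pvKwHit p.1.toList s)) := by
  induction s generalizing m with
  | nil => simp [pvScan, pvKwHit]
  | cons c rest ih =>
    rw [pvScan, ih, pvStep_contains, Bool.or_assoc]
    congr 1
    have hfun : (fun p : String × String => p.2 == t && pvKwHit p.1.toList (c :: rest))
        = fun p => (p.2 == t && p.1.toList.isPrefixOf (c :: rest)) || (p.2 == t && pvKwHit p.1.toList rest) := by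
      funext p
      rw [show pvKwHit p.1.toList (c :: rest)
            = (p.1.toList.isPrefixOf (c :: rest) || pvKwHit p.1.toList rest) from rfl,
          Bool.and_or_distrib_left]
    rw [hfun, pvAnyOr]

theorem pvAnyCongr (s : List Char) (t : String) (l : List (String × String))
    (hne : ∀ p ∈ l, p.1.toList ≠ ([] : List Char)) :
    l.any (fun p => p.2 == t && pvKwHit p.1.toList s)
      = l.any (fun p => p.2 == t && PySem.Chars.isIn p.1.toList s) := by
  induction l with
  | nil => rfl
  | cons p l ih =>
    rw [List.any_cons, List.any_cons,
        pvKwHit_eq_isIn p.1.toList (hne p List.mem_cons_self) s,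
        ih (fun r hr => hne r (List.mem_cons_of_mem _ hr))]

-- membership of each tool in B's matched set equals A's per-branch test
theorem pvMatched (q : String) (t : String) :
    PySem.Set.contains (pvScan q.toList PySem.Set.empty) t
      = pvKwTool.any (fun p => p.2 == t && PySem.Chars.isIn p.1.toList q.toList) := by
  rw [pvScan_contains,
      show PySem.Set.contains PySem.Set.empty t = false from rfl, Bool.false_or]
  exact pvAnyCongr q.toList t pvKwTool (by decide)

-- ===== VERDICT (by name: the statement is the Claim_ definition above) =====
theorem suggest_tools_spec : Claim_equal_suggest_tools := by
  intro query _
  unfold Spec_suggest_tools suggest_tools suggest_tools_alt pvToolOrder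
  have h1 := pvMatched (PySem.Str.lower query) "search"
  have h2 := pvMatched (PySem.Str.lower query) "calculator"
  have h3 := pvMatched (PySem.Str.lower query) "chart"
  simp only [pvKwTool, List.any_cons, List.any_nil] at h1 h2 h3
  simp at h1 h2 h3
  simp only [List.filter_cons, List.filter_nil, h1, h2, h3]
  simp only [List.any_cons, List.any_nil, PySem.Str.isIn_eq, PySem.Str.toList_lower]
  split_ifs <;> simp_all
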